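-- pv_equiv track=rewrite | github.com/ConcurAc/PyPokerGUI | submission/conbot.py | _is_premium_hand
-- ===== SOURCE A (Python) =====
-- def _is_premium_hand(hole_card):
--     """Check if we have a premium starting hand"""
--     if len(hole_card) != 2:
--         return False
--
--     ranks = [card[1] for card in hole_card]
--     suits = [card[0] for card in hole_card]
--     is_pair = ranks[0] == ranks[1]
--     is_suited = suits[0] == suits[1]
--
--     # High pairs
--     if is_pair and ranks[0] in ['A', 'K', 'Q', 'J', 'T']:
--         return True
--     # High suited cards
--     if is_suited and all(r in ['A', 'K', 'Q', 'J', 'T'] for r in ranks):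
--         return True
--     # Ace with high kicker
--     if 'A' in ranks and any(r in ['K', 'Q', 'J', 'T'] for r in ranks):
--         return True
--     return False
-- ===== SOURCE B (Python) =====
-- # Table-driven: one order-insensitive rank key looked up in two precomputed sets
-- # (any-suit premiums; suited-only premiums) instead of three sequential branches.
--
-- _PREMIUM_ANY = {('A', 'A'), ('K', 'K'), ('Q', 'Q'), ('J', 'J'), ('T', 'T'),
--                 ('A', 'J'), ('A', 'K'), ('A', 'Q'), ('A', 'T')}
-- _PREMIUM_SUITED = {('J', 'K'), ('J', 'Q'), ('J', 'T'),
--                    ('K', 'Q'), ('K', 'T'), ('Q', 'T')}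
--
--
-- def _is_premium_hand(hole_card):
--     if len(hole_card) != 2:
--         return False
--     first, second = hole_card
--     key = tuple(sorted((first[1], second[1])))
--     return key in _PREMIUM_ANY or (first[0] == second[0] and key in _PREMIUM_SUITED)
-- ===== Notes on version B (the rewrite author's own statement) =====
-- stated objective: idiomatic
-- what changed: Replaces the three sequential positional if-branches by a single order-insensitive sorted rank key looked up in two precomputed tables (any-suit premiums and suited-only premiums).
import Mathlib
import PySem

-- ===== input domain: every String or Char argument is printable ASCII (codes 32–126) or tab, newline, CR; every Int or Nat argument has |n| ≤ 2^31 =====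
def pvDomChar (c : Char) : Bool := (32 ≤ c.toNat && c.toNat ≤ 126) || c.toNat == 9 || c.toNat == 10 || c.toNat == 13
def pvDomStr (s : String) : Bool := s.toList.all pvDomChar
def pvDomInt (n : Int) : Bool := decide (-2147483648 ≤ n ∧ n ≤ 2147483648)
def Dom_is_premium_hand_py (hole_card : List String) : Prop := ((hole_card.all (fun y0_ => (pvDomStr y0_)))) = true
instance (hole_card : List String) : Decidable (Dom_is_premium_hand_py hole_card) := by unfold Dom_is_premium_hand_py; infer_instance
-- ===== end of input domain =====

-- B replaces A's three sequential positional branches by one order-insensitive sorted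
-- rank key looked up in two precomputed tables (idiomatic, table-driven rewrite).

-- ===== PORT A =====
def is_premium_hand_py (hole_card : List String) : Bool :=
  if hole_card.length ≠ 2 then false
  else
    match hole_card with
    | [c0, c1] =>
      match PySem.Str.pyGet? c0 1, PySem.Str.pyGet? c1 1,
            PySem.Str.pyGet? c0 0, PySem.Str.pyGet? c1 0 with
      | some r0, some r1, some s0, some s1 =>
        let is_pair := r0 == r1
        let is_suited := s0 == s1
        if is_pair && ['A','K','Q','J','T'].contains r0 then true
        else if is_suited && ([r0, r1].all (fun r => ['A','K','Q','J','T'].contains r)) then true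
        else if ([r0, r1].contains 'A') && ([r0, r1].any (fun r => ['K','Q','J','T'].contains r)) then true
        else false
      | _, _, _, _ => false   -- IndexError in Python; these inputs are excluded by Pre_
    | _ => false

-- ===== PORT B =====
def pvPremiumAny : List (Char × Char) :=
  [('A','A'), ('K','K'), ('Q','Q'), ('J','J'), ('T','T'),
   ('A','J'), ('A','K'), ('A','Q'), ('A','T')]

def pvPremiumSuited : List (Char × Char) :=
  [('J','K'), ('J','Q'), ('J','T'), ('K','Q'), ('K','T'), ('Q','T')]

def pvAltBody (fst snd : String) : Bool :=
  -- card[1]/card[0]: none = IndexError in Python; those inputs are excluded by Pre_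
  (((PySem.Str.pyGet? fst 1).bind fun r0 =>
    (PySem.Str.pyGet? snd 1).bind fun r1 =>
    (PySem.Str.pyGet? fst 0).bind fun s0 =>
    (PySem.Str.pyGet? snd 0).map fun s1 =>
      -- key = tuple(sorted((fst[1], snd[1]))): sorting a pair is one comparison
      let key := if r0 ≤ r1 then (r0, r1) else (r1, r0)
      pvPremiumAny.contains key || (s0 == s1 && pvPremiumSuited.contains key))).getD false

def is_premium_hand_py_alt (hole_card : List String) : Bool :=
  -- 'first, second = hole_card' unpacking, after the len(hole_card) == 2 guard
  if hole_card.length ≠ 2 then false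
  else
    ((hole_card.head?.bind fun fst =>
      hole_card.tail.head?.map fun snd => pvAltBody fst snd)).getD false

-- ===== PRECONDITION & SPEC =====
-- Pre_ excludes only inputs where A raises IndexError: a two-card list whose card
-- string has fewer than 2 characters (card[1]/card[0] fails in both Pythons).
def Pre_is_premium_hand_py (hole_card : List String) : Prop :=
  hole_card.length = 2 → ∀ c ∈ hole_card, 2 ≤ c.length
instance (hole_card : List String) : Decidable (Pre_is_premium_hand_py hole_card) := by
  unfold Pre_is_premium_hand_py; infer_instance

def pvWitness_is_premium_hand_py : List String := ["SA", "HK"]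

def Spec_is_premium_hand_py (hole_card : List String) (out : Bool) : Prop := out = is_premium_hand_py_alt hole_card
instance (hole_card : List String) (out : Bool) : Decidable (Spec_is_premium_hand_py hole_card out) := by unfold Spec_is_premium_hand_py; infer_instance

-- ===== CLAIM (what is proved, stated in full; the proofs are below) =====
def Claim_equal_is_premium_hand_py : Prop := ∀ (hole_card : List String), Dom_is_premium_hand_py hole_card → Pre_is_premium_hand_py hole_card → Spec_is_premium_hand_py hole_card (is_premium_hand_py hole_card)

-- ===== LEMMAS AND PROOFS =====

-- a 2-character card string yields `some` at indices 0 and 1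
theorem pv_get1 (s : String) (h : 2 ≤ s.length) : ∃ x, PySem.Str.pyGet? s 1 = some x := by
  have h2 : 1 < s.length := by omega
  simp [PySem.Str.pyGet?, PySem.Chars.pyGet?, PySem.List.pyGet?, PySem.List.pyIdx?, h2]

theorem pv_get0 (s : String) (h : 2 ≤ s.length) : ∃ x, PySem.Str.pyGet? s 0 = some x := by
  have h2 : 0 < s.length := by omega
  simp [PySem.Str.pyGet?, PySem.Chars.pyGet?, PySem.List.pyGet?, PySem.List.pyIdx?, h2]

-- core agreement: A's three branches equal B's table lookup, for any four characters
theorem pv_core (r0 r1 s0 s1 : Char) :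
    (let is_pair := r0 == r1
     let is_suited := s0 == s1
     if is_pair && ['A','K','Q','J','T'].contains r0 then true
     else if is_suited && ([r0, r1].all (fun r => ['A','K','Q','J','T'].contains r)) then true
     else if ([r0, r1].contains 'A') && ([r0, r1].any (fun r => ['K','Q','J','T'].contains r)) then true
     else false)
    = (let key := if r0 ≤ r1 then (r0, r1) else (r1, r0)
       pvPremiumAny.contains key || (s0 == s1 && pvPremiumSuited.contains key)) := by
  by_cases h0 : r0 ∈ ['A','K','Q','J','T']
  · by_cases h1 : r1 ∈ ['A','K','Q','J','T']
    · fin_cases h0 <;> fin_cases h1 <;> by_cases hs : s0 = s1 <;>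
        simp [pvPremiumAny, pvPremiumSuited, hs, Char.le_def]
    · simp only [List.mem_cons, List.not_mem_nil, or_false, not_or] at h1
      obtain ⟨n1, n2, n3, n4, n5⟩ := h1
      fin_cases h0 <;>
        simp [pvPremiumAny, pvPremiumSuited, n1, n2, n3, n4, n5,
          Ne.symm n1, Ne.symm n2, Ne.symm n3, Ne.symm n4, Ne.symm n5, Prod.ext_iff] <;>
        split <;> simp [n1, n2, n3, n4, n5]
  · simp only [List.mem_cons, List.not_mem_nil, or_false, not_or] at h0
    obtain ⟨n1, n2, n3, n4, n5⟩ := h0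
    simp [pvPremiumAny, pvPremiumSuited, n1, n2, n3, n4, n5, Prod.ext_iff]
    split <;> simp [n1, n2, n3, n4, n5] <;>
      (rintro (h | h)
       · exact absurd h.symm n1
       · subst h; decide)

-- ===== VERDICT (by name: the statement is the Claim_ definition above) =====
theorem is_premium_hand_py_spec : Claim_equal_is_premium_hand_py := by
  intro hole_card _ hpre
  unfold Spec_is_premium_hand_py is_premium_hand_py is_premium_hand_py_alt pvAltBody
  match hole_card with
  | [] => simp
  | [_] => simp
  | c0 :: c1 :: c2 :: rest => simp
  | [c0, c1] =>
    have h0 : 2 ≤ c0.length := hpre rfl c0 (by simp)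
    have h1 : 2 ≤ c1.length := hpre rfl c1 (by simp)
    obtain ⟨r0, hr0⟩ := pv_get1 c0 h0
    obtain ⟨r1, hr1⟩ := pv_get1 c1 h1
    obtain ⟨s0, hs0⟩ := pv_get0 c0 h0
    obtain ⟨s1, hs1⟩ := pv_get0 c1 h1
    simp only [hr0, hr1, hs0, hs1, List.length_cons, List.length_nil, List.head?_cons,
      List.tail_cons, Option.bind_some, Option.map_some, Option.getD_some, ne_eq]
    simpa using pv_core r0 r1 s0 s1
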